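-- pv_equiv track=rewrite | github.com/Timothy2015/Leetcode | 浦发机考真题/64.n元最多喝多少瓶饮料_2.py | maxN
-- ===== SOURCE A (Python) =====
-- def maxN(n):
--     if n==1: return 1
--     if n==2: return 4
--     if n==3: return 11
--     res = 11
--     for i in range(4, n+1):
--         res += 6
--     return res
-- ===== SOURCE B (Python) =====
-- def maxN(n):
--     if n == 1: return 1
--     if n == 2: return 4
--     return 11 + 6 * max(n - 3, 0)
-- ===== Notes on version B (the rewrite author's own statement) =====
-- stated objective: faster
-- what changed: Replaces A's linear loop that accumulates a constant increment per extra bottle with a single closed-form arithmetic expression.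
import Mathlib
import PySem

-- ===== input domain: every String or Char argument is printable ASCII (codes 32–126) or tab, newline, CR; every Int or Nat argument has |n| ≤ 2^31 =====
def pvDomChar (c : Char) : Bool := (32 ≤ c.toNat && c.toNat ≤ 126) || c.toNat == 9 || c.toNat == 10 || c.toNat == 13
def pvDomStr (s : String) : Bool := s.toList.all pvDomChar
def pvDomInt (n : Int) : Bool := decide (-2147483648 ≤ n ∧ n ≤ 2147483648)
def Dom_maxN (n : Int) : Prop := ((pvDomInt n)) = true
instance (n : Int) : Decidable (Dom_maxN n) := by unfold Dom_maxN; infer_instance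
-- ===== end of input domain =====

-- B replaces A's O(n) add-6 loop with the closed form 11 + 6*max(n-3, 0) (O(1)).


-- ===== PORT A =====
def maxN (n : Int) : Int :=
  if n == 1 then 1
  else if n == 2 then 4
  else if n == 3 then 11
  else (PySem.List.pyRange 4 (n + 1) 1).foldl (fun res _ => res + 6) 11

-- ===== PORT B =====
def maxN_alt (n : Int) : Int :=
  if n == 1 then 1
  else if n == 2 then 4
  else 11 + 6 * max (n - 3) 0

-- ===== PRECONDITION & SPEC =====
def Spec_maxN (n : Int) (out : Int) : Prop := out = maxN_alt n
instance (n : Int) (out : Int) : Decidable (Spec_maxN n out) := by unfold Spec_maxN; infer_instance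

-- ===== CLAIM (what is proved, stated in full; the proofs are below) =====
def Claim_equal_maxN : Prop := ∀ (n : Int), Dom_maxN n → Spec_maxN n (maxN n)

-- ===== LEMMAS AND PROOFS =====
theorem foldl_add_six (l : List Int) (init : Int) :
    l.foldl (fun res _ => res + 6) init = init + 6 * l.length := by
  induction l generalizing init with
  | nil => simp
  | cons x xs ih => simp [List.foldl, ih]; ring

-- ===== VERDICT (by name: the statement is the Claim_ definition above) =====
theorem maxN_spec : Claim_equal_maxN := by
  intro n _
  unfold Spec_maxN maxN maxN_alt
  split_ifs with h1 h2 h3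
  · rfl
  · rfl
  · simp at h3
    subst h3
    norm_num
  · rw [foldl_add_six, PySem.List.length_pyRange_one]
    simp at h1 h2 h3
    omega
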